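-- pv_equiv track=rewrite | github.com/Vesterlund/AdventOfCode | 2023/13_Point_of_Incidence/main.py | findMirror
-- ===== SOURCE A (Python) =====
-- def findMirror(row):
--     rowLength = len(row)
--     mirrorIndex = []
--     for mirrorPos in range(1, rowLength):
--         mirroredElements = min(mirrorPos, rowLength - mirrorPos)
--
--         frontElements = row[mirrorPos-mirroredElements:mirrorPos]
--         backElements = row[mirrorPos:mirrorPos + mirroredElements]
--
--         frontElements.reverse()
--
--         if all(f == b for f,b in zip(frontElements, backElements)):
--             mirrorIndex.append(mirrorPos)
--
--     if not mirrorIndex: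
--         return [-1]
--
--     return mirrorIndex
-- ===== SOURCE B (Python) =====
-- def findMirror(row):
--     n = len(row)
--     res = []
--     for p in range(1, n):
--         i, j = p - 1, p
--         while i >= 0 and j < n and row[i] == row[j]:
--             i -= 1
--             j += 1
--         if i < 0 or j >= n:
--             res.append(p)
--     return res if res else [-1]
-- ===== Notes on version B (the rewrite author's own statement) =====
-- stated objective: alternative
-- what changed: Replaces A's slice-copy/reverse/zip full-window comparison per position with a two-pointer expansion outward from each boundary that stops at the first mismatch; a mirror is reported iff a pointer runs off an edge.
import Mathlib
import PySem

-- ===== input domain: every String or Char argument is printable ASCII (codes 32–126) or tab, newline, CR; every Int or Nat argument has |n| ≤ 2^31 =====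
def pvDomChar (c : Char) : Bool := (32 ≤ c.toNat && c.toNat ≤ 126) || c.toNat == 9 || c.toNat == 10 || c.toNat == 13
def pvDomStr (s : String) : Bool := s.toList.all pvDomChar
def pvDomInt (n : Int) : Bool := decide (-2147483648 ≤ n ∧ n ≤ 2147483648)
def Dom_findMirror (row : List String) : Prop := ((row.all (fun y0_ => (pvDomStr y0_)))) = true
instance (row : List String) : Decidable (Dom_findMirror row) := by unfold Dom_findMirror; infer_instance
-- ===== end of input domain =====

-- B replaces A's per-position slice/reverse/zip window comparison by a two-pointer
-- expansion from each boundary with early exit on the first mismatch (alternative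
-- decomposition, no list copies; same worst-case cost).


-- ===== PORT A =====
def findMirror (row : List String) : List Int :=
  let rowLength : Int := (row.length : Int)
  let mirrorIndex : List Int :=
    (PySem.List.pyRange 1 rowLength 1).foldl (fun acc mirrorPos =>
      let mirroredElements := min mirrorPos (rowLength - mirrorPos)
      let frontElements := PySem.List.slice row (some (mirrorPos - mirroredElements)) (some mirrorPos)
      let backElements := PySem.List.slice row (some mirrorPos) (some (mirrorPos + mirroredElements))
      let frontElements := frontElements.reverse
      if (frontElements.zip backElements).all (fun fb => fb.1 == fb.2) then
        acc ++ [mirrorPos]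
      else acc) []
  if mirrorIndex = [] then [-1] else mirrorIndex

-- ===== PORT B =====
-- B's while loop; the Nat fuel only makes it total (row.length + 1 always suffices:
-- the loop runs at most min(p, n-p) ≤ n times).
def findMirrorExpand (row : List String) (n : Int) : Nat → Int → Int → Bool
  | 0, _, _ => false
  | fuel + 1, i, j =>
    if i < 0 || n ≤ j then true
    else if PySem.List.pyGetD row i "" == PySem.List.pyGetD row j "" then
      findMirrorExpand row n fuel (i - 1) (j + 1)
    else false

def findMirror_alt (row : List String) : List Int :=
  let n : Int := (row.length : Int)
  let res : List Int :=
    (PySem.List.pyRange 1 n 1).foldl (fun acc p =>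
      if findMirrorExpand row n (row.length + 1) (p - 1) p then acc ++ [p] else acc) []
  if res = [] then [-1] else res

-- ===== PRECONDITION & SPEC =====
def Spec_findMirror (row : List String) (out : List Int) : Prop := out = findMirror_alt row
instance (row : List String) (out : List Int) : Decidable (Spec_findMirror row out) := by unfold Spec_findMirror; infer_instance

-- ===== CLAIM (what is proved, stated in full; the proofs are below) =====
def Claim_equal_findMirror : Prop := ∀ (row : List String), Dom_findMirror row → Spec_findMirror row (findMirror row)

-- ===== LEMMAS AND PROOFS =====

-- zip/all of string equality tests is pointwise getElem equality
theorem pvZipAllEq (xs ys : List String) :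
    ((xs.zip ys).all (fun fb => fb.1 == fb.2)) = true ↔
      ∀ (k : Nat) (h1 : k < xs.length) (h2 : k < ys.length), xs[k] = ys[k] := by
  induction xs generalizing ys with
  | nil => simp
  | cons x xs ih =>
    cases ys with
    | nil => simp
    | cons y ys =>
      simp only [List.zip_cons_cons, List.all_cons, Bool.and_eq_true, beq_iff_eq, ih]
      constructor
      · rintro ⟨hxy, h⟩ k h1 h2
        cases k with
        | zero => simpa using hxy
        | succ k => simpa using h k (by simpa using h1) (by simpa using h2)
      · intro h
        refine ⟨by simpa using h 0 (by simp) (by simp), fun k h1 h2 => ?_⟩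
        simpa using h (k + 1) (by simpa using h1) (by simpa using h2)

-- B's loop returns true iff every in-range outward pair agrees (fuel large enough)
theorem pvExpand_iff (row : List String) (fuel : Nat) (i j : Int)
    (hfuel : (min (i + 1) ((row.length : Int) - j)).toNat < fuel) :
    findMirrorExpand row (row.length : Int) fuel i j = true ↔
      ∀ t : Nat, (t : Int) < min (i + 1) ((row.length : Int) - j) →
        PySem.List.pyGetD row (i - t) "" = PySem.List.pyGetD row (j + t) "" := by
  induction fuel generalizing i j with
  | zero => omega
  | succ fuel ih =>
    by_cases hedge : i < 0 ∨ (row.length : Int) ≤ j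
    · have hm : min (i + 1) ((row.length : Int) - j) ≤ 0 := by omega
      simp only [findMirrorExpand]
      rw [if_pos (by simpa [decide_eq_true_iff] using hedge)]
      constructor
      · intro _ t ht; exfalso; omega
      · intro _; rfl
    · push Not at hedge
      have hi : 0 ≤ i := by omega
      have hj : j < (row.length : Int) := hedge.2
      simp only [findMirrorExpand]
      rw [if_neg (by simp; omega)]
      by_cases heq : PySem.List.pyGetD row i "" = PySem.List.pyGetD row j ""
      · rw [if_pos (by simpa using heq)]
        have hmin : min ((i - 1) + 1) ((row.length : Int) - (j + 1))
            = min (i + 1) ((row.length : Int) - j) - 1 := by omega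
        rw [ih (i - 1) (j + 1) (by omega)]
        constructor
        · intro h t ht
          cases t with
          | zero => simpa using heq
          | succ t =>
            have := h t (by push_cast at ht ⊢; omega)
            have e1 : i - 1 - (t : Int) = i - ((t : Nat) + 1 : Nat) := by push_cast; ring
            have e2 : j + 1 + (t : Int) = j + ((t : Nat) + 1 : Nat) := by push_cast; ring
            rw [e1, e2] at this; exact this
        · intro h t ht
          have := h (t + 1) (by push_cast at ht ⊢; omega)
          have e1 : i - ((t : Nat) + 1 : Nat) = i - 1 - (t : Int) := by push_cast; ring
          have e2 : j + ((t : Nat) + 1 : Nat) = j + 1 + (t : Int) := by push_cast; ring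
          rw [e1, e2] at this; exact this
      · rw [if_neg (by simpa using heq)]
        constructor
        · intro h; exact absurd h (by simp)
        · intro h
          exact absurd (by simpa using h 0 (by omega)) heq

-- A's window test at position p equals B's expansion test
theorem pvCond_eq (row : List String) (p : Int) (hp1 : 1 ≤ p) (hp2 : p < (row.length : Int)) :
    (let m := min p ((row.length : Int) - p)
     (((PySem.List.slice row (some (p - m)) (some p)).reverse.zip
        (PySem.List.slice row (some p) (some (p + m)))).all (fun fb => fb.1 == fb.2)))
    = findMirrorExpand row (row.length : Int) (row.length + 1) (p - 1) p := by
  simp only []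
  set n : Int := (row.length : Int) with hn
  set m : Int := min p (n - p) with hm
  have hm0 : 0 ≤ m := by omega
  have hmp : m ≤ p := by omega
  have hmnp : m ≤ n - p := by omega
  -- slices as drop/take
  have hfront : PySem.List.slice row (some (p - m)) (some p)
      = (row.drop (p - m).toNat).take (p.toNat - (p - m).toNat) :=
    PySem.List.slice_of_nonneg row (by omega) (by omega) (by omega) (by omega)
  have hback : PySem.List.slice row (some p) (some (p + m))
      = (row.drop p.toNat).take ((p + m).toNat - p.toNat) :=
    PySem.List.slice_of_nonneg row (by omega) (by omega) (by omega) (by omega)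
  have hlen : row.length = n.toNat := by omega
  have hflen : ((row.drop (p - m).toNat).take (p.toNat - (p - m).toNat)).length = m.toNat := by
    simp [List.length_take, List.length_drop]; omega
  have hblen : ((row.drop p.toNat).take ((p + m).toNat - p.toNat)).length = m.toNat := by
    simp [List.length_take, List.length_drop]; omega
  rw [hfront, hback]
  have hfa : (min ((p - 1) + 1) (n - p)).toNat < row.length + 1 := by omega
  rw [Bool.eq_iff_iff, pvZipAllEq, pvExpand_iff row (row.length + 1) (p - 1) p hfa]
  have hmin : min ((p - 1) + 1) (n - p) = m := by omega
  rw [hmin]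
  constructor
  · intro h t ht
    have htm : t < m.toNat := by omega
    have h1 : t < ((row.drop (p - m).toNat).take (p.toNat - (p - m).toNat)).reverse.length := by
      simp [hflen]; omega
    have h2 : t < ((row.drop p.toNat).take ((p + m).toNat - p.toNat)).length := by omega
    have := h t h1 h2
    -- rewrite both getElems to getElems of row
    rw [List.getElem_reverse] at this
    rw [List.getElem_take, List.getElem_drop] at this
    rw [List.getElem_take, List.getElem_drop] at this
    have e1 : PySem.List.pyGetD row (p - 1 - t) ""
        = row[(p - m).toNat + (((row.drop (p - m).toNat).take (p.toNat - (p - m).toNat)).length - 1 - t)]'(by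
            rw [hflen]; omega) := by
      rw [PySem.List.pyGetD_eq_getElem row "" (by omega) (by omega)]
      congr 1
      rw [hflen]; omega
    have e2 : PySem.List.pyGetD row (p + t) ""
        = row[p.toNat + t]'(by omega) := by
      rw [PySem.List.pyGetD_eq_getElem row "" (by omega) (by omega)]
      congr 1; omega
    rw [e1, e2]; exact this
  · intro h k h1 h2
    have hk : k < m.toNat := by
      have := h1; rw [List.length_reverse, hflen] at this; exact this
    rw [List.getElem_reverse, List.getElem_take, List.getElem_drop,
        List.getElem_take, List.getElem_drop]
    have := h k (by omega)
    have e1 : PySem.List.pyGetD row (p - 1 - k) ""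
        = row[(p - m).toNat + (((row.drop (p - m).toNat).take (p.toNat - (p - m).toNat)).length - 1 - k)]'(by
            rw [hflen]; omega) := by
      rw [PySem.List.pyGetD_eq_getElem row "" (by omega) (by omega)]
      congr 1; rw [hflen]; omega
    have e2 : PySem.List.pyGetD row (p + k) "" = row[p.toNat + k]'(by omega) := by
      rw [PySem.List.pyGetD_eq_getElem row "" (by omega) (by omega)]
      congr 1; omega
    rw [e1, e2] at this
    exact this

-- ===== VERDICT (by name: the statement is the Claim_ definition above) =====
theorem findMirror_spec : Claim_equal_findMirror := by
  intro row _
  unfold Spec_findMirror findMirror findMirror_alt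
  simp only []
  have hfold : (PySem.List.pyRange 1 (row.length : Int) 1).foldl (fun acc mirrorPos =>
      let mirroredElements := min mirrorPos ((row.length : Int) - mirrorPos)
      let frontElements := PySem.List.slice row (some (mirrorPos - mirroredElements)) (some mirrorPos)
      let backElements := PySem.List.slice row (some mirrorPos) (some (mirrorPos + mirroredElements))
      let frontElements := frontElements.reverse
      if (frontElements.zip backElements).all (fun fb => fb.1 == fb.2) then
        acc ++ [mirrorPos]
      else acc) []
    = (PySem.List.pyRange 1 (row.length : Int) 1).foldl (fun acc p =>
      if findMirrorExpand row (row.length : Int) (row.length + 1) (p - 1) p then acc ++ [p] else acc) [] := by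
    apply PySem.List.foldl_congr_mem
    intro acc p hmem
    have hp := (PySem.List.mem_pyRange_one).1 hmem
    simp only []
    rw [pvCond_eq row p hp.1 hp.2]
  rw [hfold]
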